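-- pv_equiv track=rewrite | github.com/uukuguy/speechless | tasks/summary_generation/o1_demo.py | retrieve_documents
-- ===== SOURCE A (Python) =====
-- from typing import List, Dict
--
-- def kb_search_papers(query: str, top_k: int = 30) -> List[Dict]:
--     """
--     根据文本查询搜索论文片段(示例化返回)。实际项目中可连数据库或向量检索。
--     返回: [{"paper_id":..., "title":..., "chunk_id":..., "content":...}, ...]
--     """
--     # 这里为了演示，直接返回mock数据
--     return [
--         {
--             "paper_id": "paperA",
--             "title": "Loss Function Innovations",
--             "chunk_id": "1",
--             "content": "损失函数在深度学习训练中的重要性...[paperA-1]"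
--         },
--         {
--             "paper_id": "paperB",
--             "title": "Large Language Models for Planning",
--             "chunk_id": "2",
--             "content": "提升大模型规划能力的常见思路包括... [paperB-2]"
--         },
--         # ...更多mock
--     ][:top_k]
--
-- def retrieve_documents(parse_result: dict, min_papers: int = 50) -> List[Dict]:
--     """
--     根据解析结果中的 keywords 调用知识库检索相关文献切片。
--     默认希望检索到不少于 min_papers 篇文献切片，
--     并进行去重或合并操作。
--     """
--     keywords = parse_result["keywords"]
--
--     # 简化策略：先用 kb_search_papers 对每个关键词检索，再合并去重
--     all_chunks = []
--     for kw in keywords: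
--         result = kb_search_papers(kw, top_k=min_papers)
--         all_chunks.extend(result)
--
--     # 合并去重 (简单按 paper_id + chunk_id 去重)
--     unique_chunks_dict = {}
--     for chunk in all_chunks:
--         uid = f"{chunk['paper_id']}_{chunk['chunk_id']}"
--         if uid not in unique_chunks_dict:
--             unique_chunks_dict[uid] = chunk
--
--     # 返回去重后的文献切片列表
--     unique_chunks = list(unique_chunks_dict.values())
--
--     return unique_chunks
-- ===== SOURCE B (Python) =====
-- from typing import List, Dict
--
-- def kb_search_papers(query: str, top_k: int = 30) -> List[Dict]:
--     return [
--         {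
--             "paper_id": "paperA",
--             "title": "Loss Function Innovations",
--             "chunk_id": "1",
--             "content": "损失函数在深度学习训练中的重要性...[paperA-1]"
--         },
--         {
--             "paper_id": "paperB",
--             "title": "Large Language Models for Planning",
--             "chunk_id": "2",
--             "content": "提升大模型规划能力的常见思路包括... [paperB-2]"
--         },
--     ][:top_k]
--
-- def _uid(chunk: Dict) -> str:
--     return f"{chunk['paper_id']}_{chunk['chunk_id']}"
--
-- def _nub(chunks: List[Dict]) -> List[Dict]:
--     """Recursive nub: keep the head, strip all its later duplicates, recurse.
--     No seen-set and no dict: duplicates are eliminated ahead by filtering."""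
--     if not chunks:
--         return []
--     head, rest = chunks[0], chunks[1:]
--     return [head] + _nub([c for c in rest if _uid(c) != _uid(head)])
--
-- def retrieve_documents(parse_result: dict, min_papers: int = 50) -> List[Dict]:
--     chunks = [c for kw in parse_result["keywords"]
--                 for c in kb_search_papers(kw, top_k=min_papers)]
--     return _nub(chunks)
-- ===== Notes on version B (the rewrite author's own statement) =====
-- stated objective: alternative
-- what changed: Replaces A's dict-based first-occurrence dedup (insert-if-absent into a dict, then take its values) with a recursive filter-nub: take the head chunk, filter every later chunk with the same uid out of the tail, and recurse on the filtered tail; no seen structure is maintained at all.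
import Mathlib
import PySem

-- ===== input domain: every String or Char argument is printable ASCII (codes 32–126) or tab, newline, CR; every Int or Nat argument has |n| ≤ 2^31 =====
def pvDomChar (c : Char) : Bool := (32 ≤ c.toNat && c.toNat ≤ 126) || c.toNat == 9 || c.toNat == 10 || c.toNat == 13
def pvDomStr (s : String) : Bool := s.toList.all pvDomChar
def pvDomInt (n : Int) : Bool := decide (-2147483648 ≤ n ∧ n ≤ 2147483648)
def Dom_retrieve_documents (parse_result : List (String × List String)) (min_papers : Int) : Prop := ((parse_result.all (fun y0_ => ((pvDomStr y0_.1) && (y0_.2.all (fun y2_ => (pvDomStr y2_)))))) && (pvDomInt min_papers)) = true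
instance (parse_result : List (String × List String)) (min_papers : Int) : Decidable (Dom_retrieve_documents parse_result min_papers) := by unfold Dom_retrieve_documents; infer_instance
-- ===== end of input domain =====

-- B replaces A's dict-based first-occurrence dedup by a recursive filter-nub; same return value.

-- shared module context: the mock knowledge base and kb_search_papers (identical in Source A and Source B)
def pvMock : List (List (String × String)) :=
  [ [("paper_id", "paperA"), ("title", "Loss Function Innovations"),
     ("chunk_id", "1"), ("content", "损失函数在深度学习训练中的重要性...[paperA-1]")],
    [("paper_id", "paperB"), ("title", "Large Language Models for Planning"),
     ("chunk_id", "2"), ("content", "提升大模型规划能力的常见思路包括... [paperB-2]")] ]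

def pvKbSearch (_query : String) (top_k : Int) : List (List (String × String)) :=
  PySem.List.slice pvMock none (some top_k)

-- uid = f"{chunk['paper_id']}_{chunk['chunk_id']}" (both programs compute exactly this expression;
-- the mock chunks always carry both keys, so the total getD "" form is exact here)
def pvUid (chunk : List (String × String)) : String :=
  (PySem.Dict.mk chunk).getD "paper_id" "" ++ "_" ++ (PySem.Dict.mk chunk).getD "chunk_id" ""

-- ===== PORT A =====
def retrieve_documents (parse_result : List (String × List String)) (min_papers : Int) : List (List (String × String)) :=
  let keywords := ((PySem.Dict.mk parse_result).get? "keywords").getD []  -- total form; Pre_ requires the key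
  let all_chunks := keywords.foldl (fun acc kw => acc ++ pvKbSearch kw min_papers) []
  let d := all_chunks.foldl
    (fun d chunk => if d.contains (pvUid chunk) then d else d.insert (pvUid chunk) chunk)
    (PySem.Dict.empty : PySem.Dict String (List (String × String)))
  d.values

-- ===== PORT B =====
-- _nub: keep the head, filter its duplicates out of the tail, recurse
def pvNub (chunks : List (List (String × String))) : List (List (String × String)) :=
  match chunks with
  | [] => []
  | head :: rest => head :: pvNub (rest.filter (fun c => pvUid c != pvUid head))
termination_by chunks.length
decreasing_by simpa using Nat.lt_succ_of_le (List.length_filter_le _ _)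

def retrieve_documents_alt (parse_result : List (String × List String)) (min_papers : Int) : List (List (String × String)) :=
  pvNub ((((PySem.Dict.mk parse_result).get? "keywords").getD []).flatMap
    (fun kw => pvKbSearch kw min_papers))

-- ===== PRECONDITION & SPEC =====
-- Pre_ excludes only inputs on which A raises KeyError: dicts without a "keywords" entry.
def Pre_retrieve_documents (parse_result : List (String × List String)) (min_papers : Int) : Prop :=
  (PySem.Dict.mk parse_result).contains "keywords" = true
instance (parse_result : List (String × List String)) (min_papers : Int) : Decidable (Pre_retrieve_documents parse_result min_papers) := by unfold Pre_retrieve_documents; infer_instance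

def pvWitness_retrieve_documents : (List (String × List String)) × Int := ([("keywords", ["loss", "planning"])], 50)

def Spec_retrieve_documents (parse_result : List (String × List String)) (min_papers : Int) (out : List (List (String × String))) : Prop := out = retrieve_documents_alt parse_result min_papers
instance (parse_result : List (String × List String)) (min_papers : Int) (out : List (List (String × String))) : Decidable (Spec_retrieve_documents parse_result min_papers out) := by unfold Spec_retrieve_documents; infer_instance

-- ===== CLAIM =====
def Claim_equal_retrieve_documents : Prop := ∀ (parse_result : List (String × List String)) (min_papers : Int), Dom_retrieve_documents parse_result min_papers → Pre_retrieve_documents parse_result min_papers → Spec_retrieve_documents parse_result min_papers (retrieve_documents parse_result min_papers)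

-- ===== LEMMAS AND PROOFS =====

-- A's dict loop over cs, started at d, yields d.values followed by the filter-nub of the
-- chunks whose uid is not already a key of d.
lemma pv_loop_eq (cs : List (List (String × String)))
    (d : PySem.Dict String (List (String × String))) :
    (cs.foldl (fun d chunk => if d.contains (pvUid chunk) then d else d.insert (pvUid chunk) chunk) d).values
      = d.values ++ pvNub (cs.filter (fun c => !(d.contains (pvUid c)))) := by
  induction cs generalizing d with
  | nil => simp [pvNub]
  | cons c cs ih =>
    simp only [List.foldl_cons, List.filter_cons]
    by_cases h : d.contains (pvUid c) = true
    · simp only [h, if_true, Bool.not_true, Bool.false_eq_true, if_false]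
      exact ih d
    · have h' : d.contains (pvUid c) = false := by simpa using h
      simp only [h', Bool.false_eq_true, if_false, Bool.not_false, if_true]
      rw [ih (d.insert (pvUid c) c)]
      rw [pvNub]
      have hv : (d.insert (pvUid c) c).values = d.values ++ [c] := by
        simp [PySem.Dict.values, PySem.Dict.items_insert_of_not_contains _ _ h']
      rw [hv, List.filter_filter, List.append_assoc, List.singleton_append]
      congr 2
      congr 1
      apply List.filter_congr
      intro x _
      rw [PySem.Dict.contains_insert]
      cases hx : pvUid x == pvUid c <;> simp_all

-- ===== VERDICT =====
theorem retrieve_documents_spec : Claim_equal_retrieve_documents := by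
  intro parse_result min_papers _ _
  unfold Spec_retrieve_documents retrieve_documents retrieve_documents_alt
  dsimp only
  rw [PySem.List.foldl_append_eq_flatMap (fun kw => pvKbSearch kw min_papers) _ [],
    List.nil_append, pv_loop_eq]
  simp [PySem.Dict.values, PySem.Dict.empty]
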